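-- pv_equiv track=rewrite | github.com/Sigiitttt/praktikumStrukturData | Praktikum4.1.py | cek_prefix
-- ===== SOURCE A (Python) =====
-- def cek_prefix(ekspresi):
--     saldo = 0
--     karakter_diperbolehkan = set("0123456789+-*/")
--     for karakter in reversed(ekspresi):
--       #pemeriksaan karakter
--         if karakter not in karakter_diperbolehkan:
--             return False
--         if karakter.isdigit():
--             saldo += 1
--         else:
--             saldo -= 1
--           #pemeriksaan saldo
--         if saldo <= 0:
--             return False
--     return saldo == 1
-- ===== SOURCE B (Python) =====
-- def cek_prefix(ekspresi):
--     # Forward left-to-right scan: recursive-descent on the prefix grammar with an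
--     # explicit pending-expression counter instead of A's reversed-order balance.
--     pending = 1
--     i = 0
--     n = len(ekspresi)
--     while pending > 0:
--         if i == n:
--             return False
--         c = ekspresi[i]
--         i += 1
--         if c in '0123456789':
--             pending -= 1
--         elif c in '+-*/':
--             pending += 1
--         else:
--             return False
--     return i == n
-- ===== Notes on version B (the rewrite author's own statement) =====
-- stated objective: alternative
-- what changed: Replaced A's right-to-left scan with a saldo (operand-balance) counter by a forward left-to-right scan that runs a recursive-descent parse of the prefix grammar with an explicit pending-expression counter, stopping as soon as the expression is complete and then checking nothing is left over.
import Mathlib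
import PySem

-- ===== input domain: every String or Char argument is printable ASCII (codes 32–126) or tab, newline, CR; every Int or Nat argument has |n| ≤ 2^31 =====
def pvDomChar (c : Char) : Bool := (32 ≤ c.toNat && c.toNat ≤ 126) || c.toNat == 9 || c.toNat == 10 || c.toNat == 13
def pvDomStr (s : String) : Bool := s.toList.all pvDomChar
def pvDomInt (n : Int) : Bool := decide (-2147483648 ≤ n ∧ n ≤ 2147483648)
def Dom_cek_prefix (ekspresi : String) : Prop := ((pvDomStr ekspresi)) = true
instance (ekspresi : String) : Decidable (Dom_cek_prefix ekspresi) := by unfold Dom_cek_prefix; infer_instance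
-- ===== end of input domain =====

-- B replaces A's right-to-left saldo counter with a forward scan keeping a
-- pending-operand counter (explicit-stack recursive descent); alternative, same O(n) cost.


-- ===== PORT A =====
-- set("0123456789+-*/")
def pvAllowedA : List Char := ['0','1','2','3','4','5','6','7','8','9','+','-','*','/']

-- the `for karakter in reversed(ekspresi)` loop with early returns, over the reversed char list
def cekPrefixLoopA : List Char → Int → Bool
  | [], saldo => saldo == 1
  | c :: rest, saldo =>
    if c ∉ pvAllowedA then false
    else
      let saldo' := if PySem.Chars.isdigit c then saldo + 1 else saldo - 1
      if saldo' ≤ 0 then false else cekPrefixLoopA rest saldo'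

def cek_prefix (ekspresi : String) : Bool :=
  cekPrefixLoopA ekspresi.toList.reverse 0

-- ===== PORT B =====
def pvDigitsB : List Char := ['0','1','2','3','4','5','6','7','8','9']
def pvOpsB : List Char := ['+','-','*','/']

-- the `while pending > 0` loop: consuming the chars left to right replaces advancing i
def cekPrefixLoopB (cs : List Char) (pending : Nat) : Bool :=
  match pending, cs with
  | 0, cs => cs.isEmpty                -- loop over: succeed iff i == n, i.e. nothing left
  | _ + 1, [] => false                 -- i == n with expressions still pending
  | p + 1, c :: rest =>
    if c ∈ pvDigitsB then cekPrefixLoopB rest p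
    else if c ∈ pvOpsB then cekPrefixLoopB rest (p + 2)
    else false
termination_by cs.length

def cek_prefix_alt (ekspresi : String) : Bool :=
  cekPrefixLoopB ekspresi.toList 1

-- ===== PRECONDITION & SPEC =====
def Spec_cek_prefix (ekspresi : String) (out : Bool) : Prop := out = cek_prefix_alt ekspresi
instance (ekspresi : String) (out : Bool) : Decidable (Spec_cek_prefix ekspresi out) := by unfold Spec_cek_prefix; infer_instance

-- ===== CLAIM (what is proved, stated in full; the proofs are below) =====
def Claim_equal_cek_prefix : Prop := ∀ (ekspresi : String), Dom_cek_prefix ekspresi → Spec_cek_prefix ekspresi (cek_prefix ekspresi)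

-- ===== LEMMAS AND PROOFS =====

-- a char's contribution to A's saldo (+1 digit, -1 operator)
def pvBalC (c : Char) : Int := if PySem.Chars.isdigit c then 1 else -1
def pvBal (cs : List Char) : Int := (cs.map pvBalC).sum

theorem pvBal_nil : pvBal [] = 0 := rfl
theorem pvBal_cons (c : Char) (cs : List Char) : pvBal (c :: cs) = pvBalC c + pvBal cs := by
  simp [pvBal]
theorem pvBal_reverse (cs : List Char) : pvBal cs.reverse = pvBal cs := by
  simp [pvBal]
theorem pvBal_take_drop (cs : List Char) (n : Nat) :
    pvBal (cs.take n) + pvBal (cs.drop n) = pvBal cs := by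
  conv_rhs => rw [← List.take_append_drop n cs]
  simp [pvBal]

theorem mem_digits_isdigit {c : Char} (h : c ∈ pvDigitsB) : PySem.Chars.isdigit c = true := by
  fin_cases h <;> decide
theorem mem_ops_isdigit {c : Char} (h : c ∈ pvOpsB) : PySem.Chars.isdigit c = false := by
  fin_cases h <;> decide
theorem mem_allowed_iff {c : Char} : c ∈ pvAllowedA ↔ c ∈ pvDigitsB ∨ c ∈ pvOpsB := by
  simp [pvAllowedA, pvDigitsB, pvOpsB]
  tauto

-- shift a bounded quantifier by one when the 0 case holds anyway
theorem pvShift (n : Nat) (f : Nat → Prop) (h0 : f 0) :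
    (∀ k, k < n + 1 → f k) ↔ (∀ j, j < n → f (j + 1)) := by
  constructor
  · intro h j hj
    exact h (j + 1) (by omega)
  · intro h k hk
    cases k with
    | zero => exact h0
    | succ j => exact h j (by omega)

theorem loopA_iff (l : List Char) (s : Int) :
    cekPrefixLoopA l s = true ↔
      ((∀ c ∈ l, c ∈ pvAllowedA) ∧ (∀ k, k < l.length → 0 < s + pvBal (l.take (k + 1))) ∧
        s + pvBal l = 1) := by
  induction l generalizing s with
  | nil =>
    simp [cekPrefixLoopA, pvBal_nil]
  | cons c rest ih =>
    have hA : cekPrefixLoopA (c :: rest) s =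
        if c ∉ pvAllowedA then false
        else if (if PySem.Chars.isdigit c then s + 1 else s - 1) ≤ 0 then false
        else cekPrefixLoopA rest (if PySem.Chars.isdigit c then s + 1 else s - 1) := rfl
    by_cases hc : c ∈ pvAllowedA
    · have hbal : (if PySem.Chars.isdigit c then s + 1 else s - 1) = s + pvBalC c := by
        unfold pvBalC
        split <;> ring
      rw [hA, if_neg (by simp [hc]), hbal]
      by_cases hle : s + pvBalC c ≤ 0
      · rw [if_pos hle]
        simp only [Bool.false_eq_true, false_iff]
        rintro ⟨-, hpre, -⟩
        have h0 := hpre 0 (by simp)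
        rw [show (c :: rest).take (0 + 1) = [c] from rfl] at h0
        rw [pvBal_cons, pvBal_nil] at h0
        omega
      · rw [if_neg hle, ih]
        simp only [List.forall_mem_cons, List.length_cons, List.take_succ_cons, pvBal_cons]
        rw [pvShift rest.length (fun k => 0 < s + (pvBalC c + pvBal (rest.take k)))
              (by show 0 < s + (pvBalC c + pvBal (List.take 0 rest))
                  rw [List.take_zero, pvBal_nil]; omega)]
        have harr : ∀ j : Nat, (0 < s + pvBalC c + pvBal (rest.take (j + 1))) ↔
            (0 < s + (pvBalC c + pvBal (rest.take (j + 1)))) := fun j => by omega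
        simp only [harr]
        have hfin : (s + pvBalC c + pvBal rest = 1) ↔ (s + (pvBalC c + pvBal rest) = 1) := by
          omega
        rw [hfin]
        tauto
    · rw [hA, if_pos hc]
      simp only [Bool.false_eq_true, false_iff, List.forall_mem_cons]
      rintro ⟨⟨h, -⟩, -, -⟩
      exact hc h

theorem loopB_iff (cs : List Char) (p : Nat) :
    cekPrefixLoopB cs p = true ↔
      ((∀ c ∈ cs, c ∈ pvAllowedA) ∧ (∀ k, k < cs.length → pvBal (cs.take k) < (p : Int)) ∧
        pvBal cs = p) := by
  induction cs generalizing p with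
  | nil =>
    cases p with
    | zero => simp [cekPrefixLoopB, pvBal_nil]
    | succ q =>
      simp [cekPrefixLoopB, pvBal_nil]
      omega
  | cons c rest ih =>
    cases p with
    | zero =>
      simp only [cekPrefixLoopB, List.isEmpty_cons, Bool.false_eq_true, false_iff]
      rintro ⟨-, hpre, -⟩
      have h0 := hpre 0 (by simp)
      rw [List.take_zero, pvBal_nil] at h0
      omega
    | succ q =>
      simp only [cekPrefixLoopB]
      by_cases hd : c ∈ pvDigitsB
      · have hb : pvBalC c = 1 := by simp [pvBalC, mem_digits_isdigit hd]
        rw [if_pos hd, ih]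
        simp only [List.forall_mem_cons, List.length_cons, pvBal_cons, hb]
        push_cast
        rw [pvShift rest.length (fun k => pvBal ((c :: rest).take k) < ((q : Int) + 1 : Int))
              (by show pvBal (List.take 0 (c :: rest)) < ((q : Int) + 1 : Int)
                  rw [List.take_zero, pvBal_nil]; omega)]
        simp only [List.take_succ_cons, pvBal_cons, hb]
        have harr : ∀ j : Nat, (1 + pvBal (rest.take j) < ((q : Int) + 1)) ↔
            (pvBal (rest.take j) < (q : Int)) := fun j => by omega
        simp only [harr]
        have hfin : (pvBal rest = (q : Int)) ↔ (1 + pvBal rest = (q : Int) + 1) := by omega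
        rw [hfin]
        constructor
        · rintro ⟨h1, h2, h3⟩
          exact ⟨⟨mem_allowed_iff.mpr (Or.inl hd), h1⟩, h2, h3⟩
        · rintro ⟨⟨-, h1⟩, h2, h3⟩
          exact ⟨h1, h2, h3⟩
      · by_cases ho : c ∈ pvOpsB
        · have hb : pvBalC c = -1 := by simp [pvBalC, mem_ops_isdigit ho]
          rw [if_neg hd, if_pos ho, ih]
          simp only [List.forall_mem_cons, List.length_cons, pvBal_cons, hb]
          push_cast
          rw [pvShift rest.length (fun k => pvBal ((c :: rest).take k) < ((q : Int) + 1 : Int))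
                (by show pvBal (List.take 0 (c :: rest)) < ((q : Int) + 1 : Int)
                    rw [List.take_zero, pvBal_nil]; omega)]
          simp only [List.take_succ_cons, pvBal_cons, hb]
          have harr : ∀ j : Nat, (-1 + pvBal (rest.take j) < ((q : Int) + 1)) ↔
              (pvBal (rest.take j) < ((q : Int) + 2)) := fun j => by omega
          simp only [harr]
          have hfin : (pvBal rest = (q : Int) + 2) ↔ (-1 + pvBal rest = (q : Int) + 1) := by
            omega
          rw [hfin]
          constructor
          · rintro ⟨h1, h2, h3⟩
            exact ⟨⟨mem_allowed_iff.mpr (Or.inr ho), h1⟩, h2, h3⟩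
          · rintro ⟨⟨-, h1⟩, h2, h3⟩
            exact ⟨h1, h2, h3⟩
        · rw [if_neg hd, if_neg ho]
          simp only [Bool.false_eq_true, false_iff, List.forall_mem_cons]
          rintro ⟨⟨h, -⟩, -, -⟩
          rcases mem_allowed_iff.mp h with h' | h'
          · exact hd h'
          · exact ho h'

-- the two characterisations coincide for the whole string
theorem main_iff (cs : List Char) :
    cekPrefixLoopA cs.reverse 0 = true ↔ cekPrefixLoopB cs 1 = true := by
  rw [loopA_iff, loopB_iff]
  constructor
  · rintro ⟨hall, hpre, hfin⟩
    rw [pvBal_reverse] at hfin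
    simp only [zero_add] at hfin hpre
    refine ⟨fun x hx => hall x (by simp [hx]), ?_, by push_cast; omega⟩
    intro k hk
    have hk' : cs.length - (k + 1) < cs.reverse.length := by simp; omega
    have h1 := hpre (cs.length - (k + 1)) hk'
    rw [show cs.length - (k + 1) + 1 = cs.length - k by omega] at h1
    rw [show cs.reverse.take (cs.length - k)
          = (cs.drop (cs.length - (cs.length - k))).reverse from List.take_reverse ..] at h1
    rw [show cs.length - (cs.length - k) = k by omega, pvBal_reverse] at h1
    have hsplit := pvBal_take_drop cs k
    push_cast
    omega
  · rintro ⟨hall, hpre, hfin⟩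
    push_cast at hfin
    refine ⟨fun x hx => hall x (by simpa using hx), ?_, by rw [pvBal_reverse]; omega⟩
    intro k hk
    simp only [List.length_reverse] at hk
    rw [show cs.reverse.take (k + 1) = (cs.drop (cs.length - (k + 1))).reverse from
        List.take_reverse .., pvBal_reverse]
    have hm : cs.length - (k + 1) < cs.length := by omega
    have h1 := hpre (cs.length - (k + 1)) hm
    have hsplit := pvBal_take_drop cs (cs.length - (k + 1))
    push_cast at h1
    omega

-- ===== VERDICT (by name: the statement is the Claim_ definition above) =====
theorem cek_prefix_spec : Claim_equal_cek_prefix := by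
  intro ekspresi _
  unfold Spec_cek_prefix cek_prefix cek_prefix_alt
  exact Bool.coe_iff_coe.mp (main_iff ekspresi.toList)
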